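-- pv_equiv track=rewrite | github.com/mikhailolkhovskiy/made_2020_algo | 02/task_02_b.py | solve
-- ===== SOURCE A (Python) =====
-- def solve(line):
--     n = len(line)
--     map = {
--         '(': ')',
--         '{': '}',
--         '[': ']'
--     }
--     dp = {}
--
--     def search(i, j):
--         if (i, j) in dp:
--             return dp[(i, j)]
--         if i > j:
--             return 0, ""
--         elif i == j:
--             result = 1, ""
--         else:
--             min_d = n + 1
--             if map.get(line[i]) == line[j]:
--                 d, s = search(i + 1, j - 1)
--                 min_d = d
--                 result = d, line[i] + s + line[j]
--             for k in range(i, j):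
--                 d1, s1 = search(i, k)
--                 d2, s2 = search(k + 1, j)
--                 if min_d > d1 + d2:
--                     min_d = d1 + d2
--                     result = d1 + d2, s1 + s2
--         dp[(i, j)] = result
--         return result
--
--     return search(0, n - 1)[1]
-- ===== SOURCE B (Python) =====
-- def solve(line):
--     n = len(line)
--     if n == 0:
--         return ''
--     close = {'(': ')', '{': '}', '[': ']'}
--     table = {}
--     for i in range(n):
--         table[(i, i)] = (1, '')
--     for length in range(2, n + 1):
--         for i in range(n - length + 1):
--             j = i + length - 1
--             if close.get(line[i]) == line[j]:
--                 d, s = table.get((i + 1, j - 1), (0, ''))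
--                 best = (d, line[i] + s + line[j])
--             else:
--                 best = (n + 1, '')
--             for k in range(i, j):
--                 d1, s1 = table.get((i, k), (0, ''))
--                 d2, s2 = table.get((k + 1, j), (0, ''))
--                 if d1 + d2 < best[0]:
--                     best = (d1 + d2, s1 + s2)
--             table[(i, j)] = best
--     return table[(0, n - 1)][1]
-- ===== Notes on version B (the rewrite author's own statement) =====
-- stated objective: alternative
-- what changed: Replaces the memoized top-down recursion (a nested search function with a dict cache) by a bottom-up iterative interval DP that fills a table in increasing window-length order, reproducing A's tie-breaking (matched-ends candidate first, splits in increasing k, replace only on strict improvement).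
import Mathlib
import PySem

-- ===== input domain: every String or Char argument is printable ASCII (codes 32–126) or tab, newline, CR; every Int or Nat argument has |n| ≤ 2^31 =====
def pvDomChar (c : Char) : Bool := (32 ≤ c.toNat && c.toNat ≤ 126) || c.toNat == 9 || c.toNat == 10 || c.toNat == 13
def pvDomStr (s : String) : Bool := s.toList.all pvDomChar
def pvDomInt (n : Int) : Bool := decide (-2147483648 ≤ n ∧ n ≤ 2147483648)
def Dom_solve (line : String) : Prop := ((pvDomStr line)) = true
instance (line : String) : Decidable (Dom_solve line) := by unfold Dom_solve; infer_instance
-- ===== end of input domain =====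

-- Bottom-up iterative interval DP (explicit length/start loops over a table) replacing A's memoized top-down recursion; objective: alternative decomposition, same O(n^3) cost.


-- ===== PORT A =====
-- the 'map' dict of A as a lookup function (map.get)
def pvClose (c : Char) : Option Char :=
  if c = '(' then some ')' else if c = '{' then some '}' else if c = '[' then some ']' else none

-- line[i] for an index that is always in range when used (0 ≤ i ≤ j < n)
def pvAt (l : List Char) (i : Int) : Char := (PySem.List.pyGet? l i).getD ' '

-- A's memoized recursion 'search(i, j)', dp threaded through; fuel only makes
-- the recursion structural (Python's recursion always terminates; fuel is never exhausted).
def searchA (l : List Char) (n : Int) :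
    Nat → PySem.Dict (Int × Int) (Int × List Char) → Int → Int →
    ((Int × List Char) × PySem.Dict (Int × Int) (Int × List Char))
  | 0, dp, _, _ => ((0, []), dp)  -- unreachable fuel guard
  | fuel+1, dp, i, j =>
    match dp.get? (i, j) with
    | some r => (r, dp)
    | none =>
      if i > j then ((0, []), dp)   -- Python returns here WITHOUT storing in dp
      else if i = j then
        ((1, []), dp.insert (i, j) ((1 : Int), ([] : List Char)))
      else
        -- min_d / result / dp as loop state; Python leaves 'result' unassigned in the
        -- unmatched branch — placeholder (0, []) is always overwritten by the first k.
        let init : Int × (Int × List Char) × PySem.Dict (Int × Int) (Int × List Char) :=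
          if pvClose (pvAt l i) = some (pvAt l j) then
            let r := searchA l n fuel dp (i+1) (j-1)
            (r.1.1, (r.1.1, pvAt l i :: r.1.2 ++ [pvAt l j]), r.2)
          else (n + 1, ((0 : Int), ([] : List Char)), dp)
        let st := (PySem.List.pyRange i j 1).foldl (fun st k =>
          let r1 := searchA l n fuel st.2.2 i k
          let r2 := searchA l n fuel r1.2 (k+1) j
          if st.1 > r1.1.1 + r2.1.1 then
            (r1.1.1 + r2.1.1, (r1.1.1 + r2.1.1, r1.1.2 ++ r2.1.2), r2.2)
          else (st.1, st.2.1, r2.2)) init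
        (st.2.1, st.2.2.insert (i, j) st.2.1)

def solve (line : String) : String :=
  let l := line.toList
  let n : Int := l.length
  String.ofList (searchA l n (l.length + 1) PySem.Dict.empty 0 (n - 1)).1.2

-- ===== PORT B =====
def solve_alt (line : String) : String :=
  let l := line.toList
  let n : Int := l.length
  if n = 0 then "" else
  let t0 := (PySem.List.pyRange 0 n 1).foldl
      (fun t i => t.insert (i, i) ((1 : Int), ([] : List Char)))
      (PySem.Dict.empty : PySem.Dict (Int × Int) (Int × List Char))
  let t := (PySem.List.pyRange 2 (n+1) 1).foldl (fun t len =>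
    (PySem.List.pyRange 0 (n - len + 1) 1).foldl (fun t i =>
      let j := i + len - 1
      let best :=
        if pvClose (pvAt l i) = some (pvAt l j) then
          let ds := t.getD (i+1, j-1) (0, [])
          (ds.1, pvAt l i :: ds.2 ++ [pvAt l j])
        else (n + 1, ([] : List Char))
      let best2 := (PySem.List.pyRange i j 1).foldl (fun best k =>
        let p1 := t.getD (i, k) (0, [])
        let p2 := t.getD (k+1, j) (0, [])
        if p1.1 + p2.1 < best.1 then (p1.1 + p2.1, p1.2 ++ p2.2) else best) best
      t.insert (i, j) best2) t) t0
  String.ofList (t.getD (0, n-1) (0, [])).2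

-- ===== PRECONDITION & SPEC =====
def Spec_solve (line : String) (out : String) : Prop := out = solve_alt line
instance (line : String) (out : String) : Decidable (Spec_solve line out) := by unfold Spec_solve; infer_instance

-- ===== CLAIM (what is proved, stated in full; the proofs are below) =====
def Claim_equal_solve : Prop := ∀ (line : String), Dom_solve line → Spec_solve line (solve line)

-- ===== LEMMAS AND PROOFS =====

-- the pure value both programs compute for a window (i, j), with fuel
def gF (l : List Char) (n : Int) : Nat → Int → Int → Int × List Char
  | 0, _, _ => (0, [])
  | fuel+1, i, j =>
    if i > j then (0, [])
    else if i = j then (1, [])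
    else
      let init : Int × (Int × List Char) :=
        if pvClose (pvAt l i) = some (pvAt l j) then
          let r := gF l n fuel (i+1) (j-1)
          (r.1, (r.1, pvAt l i :: r.2 ++ [pvAt l j]))
        else (n + 1, (0, []))
      let st := (PySem.List.pyRange i j 1).foldl (fun st k =>
        let r1 := gF l n fuel i k
        let r2 := gF l n fuel (k+1) j
        if st.1 > r1.1 + r2.1 then (r1.1 + r2.1, (r1.1 + r2.1, r1.2 ++ r2.2)) else st) init
      st.2

def g (l : List Char) (n : Int) (i j : Int) : Int × List Char := gF l n ((j - i).toNat + 1) i j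

theorem gF_succ (l : List Char) (n : Int) (fuel : Nat) (i j : Int) :
    gF l n (fuel+1) i j =
    (if i > j then (0, [])
    else if i = j then (1, [])
    else
      let init : Int × (Int × List Char) :=
        if pvClose (pvAt l i) = some (pvAt l j) then
          let r := gF l n fuel (i+1) (j-1)
          (r.1, (r.1, pvAt l i :: r.2 ++ [pvAt l j]))
        else (n + 1, (0, []))
      let st := (PySem.List.pyRange i j 1).foldl (fun st k =>
        let r1 := gF l n fuel i k
        let r2 := gF l n fuel (k+1) j
        if st.1 > r1.1 + r2.1 then (r1.1 + r2.1, (r1.1 + r2.1, r1.2 ++ r2.2)) else st) init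
      st.2) := rfl

theorem gF_irrel (l : List Char) (n : Int) :
    ∀ f1 f2 i j, (j - i).toNat < f1 → (j - i).toNat < f2 →
      gF l n f1 i j = gF l n f2 i j := by
  intro f1
  induction f1 with
  | zero => intro f2 i j h1 h2; omega
  | succ f1 ih =>
    intro f2 i j h1 h2
    match f2 with
    | 0 => omega
    | f2 + 1 =>
      simp only [gF]
      by_cases hgt : i > j
      · simp [hgt]
      · simp only [if_neg hgt]
        by_cases heq : i = j
        · simp [heq]
        · simp only [if_neg heq]
          have hij : i < j := by omega
          have hinit :
              (if pvClose (pvAt l i) = some (pvAt l j) then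
                let r := gF l n f1 (i+1) (j-1)
                (r.1, (r.1, pvAt l i :: r.2 ++ [pvAt l j]))
              else (n + 1, ((0:Int), ([]:List Char)))) =
              (if pvClose (pvAt l i) = some (pvAt l j) then
                let r := gF l n f2 (i+1) (j-1)
                (r.1, (r.1, pvAt l i :: r.2 ++ [pvAt l j]))
              else (n + 1, ((0:Int), ([]:List Char)))) := by
            by_cases hm : pvClose (pvAt l i) = some (pvAt l j)
            · simp only [if_pos hm]
              rw [ih f2 (i+1) (j-1) (by omega) (by omega)]
            · simp [hm]
          rw [hinit]
          have hfold := PySem.List.foldl_congr_mem'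
            (l := PySem.List.pyRange i j 1)
            (init := if pvClose (pvAt l i) = some (pvAt l j) then
                let r := gF l n f2 (i+1) (j-1)
                (r.1, (r.1, pvAt l i :: r.2 ++ [pvAt l j]))
              else (n + 1, ((0:Int), ([]:List Char))))
            (f := fun (st : Int × (Int × List Char)) k =>
              let r1 := gF l n f1 i k
              let r2 := gF l n f1 (k+1) j
              if st.1 > r1.1 + r2.1 then (r1.1 + r2.1, (r1.1 + r2.1, r1.2 ++ r2.2)) else st)
            (g := fun (st : Int × (Int × List Char)) k =>
              let r1 := gF l n f2 i k
              let r2 := gF l n f2 (k+1) j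
              if st.1 > r1.1 + r2.1 then (r1.1 + r2.1, (r1.1 + r2.1, r1.2 ++ r2.2)) else st)
            (by
              intro k hk st
              rw [PySem.List.mem_pyRange_one] at hk
              simp only [ih f2 i k (by omega) (by omega), ih f2 (k+1) j (by omega) (by omega)])
          rw [hfold]

theorem g_gt (l : List Char) (n : Int) {i j : Int} (h : j < i) : g l n i j = (0, []) := by
  unfold g
  simp only [gF]
  simp [show i > j from h]

theorem g_eq (l : List Char) (n : Int) (i : Int) : g l n i i = (1, []) := by
  unfold g
  simp only [gF]
  simp

-- pure loop step / init, used to state the unfolding of g on i < j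
def initG (l : List Char) (n : Int) (i j : Int) : Int × (Int × List Char) :=
  if pvClose (pvAt l i) = some (pvAt l j) then
    let r := g l n (i+1) (j-1)
    (r.1, (r.1, pvAt l i :: r.2 ++ [pvAt l j]))
  else (n + 1, (0, []))

def stepG (l : List Char) (n : Int) (i j : Int) (st : Int × (Int × List Char)) (k : Int) :
    Int × (Int × List Char) :=
  let r1 := g l n i k
  let r2 := g l n (k+1) j
  if st.1 > r1.1 + r2.1 then (r1.1 + r2.1, (r1.1 + r2.1, r1.2 ++ r2.2)) else st

theorem gF_eq_g (l : List Char) (n : Int) {f : Nat} {i j : Int} (h : (j - i).toNat < f) :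
    gF l n f i j = g l n i j :=
  gF_irrel l n f ((j - i).toNat + 1) i j h (by omega)

theorem g_lt (l : List Char) (n : Int) {i j : Int} (h : i < j) :
    g l n i j = ((PySem.List.pyRange i j 1).foldl (stepG l n i j) (initG l n i j)).2 := by
  unfold g
  rw [gF_succ]
  rw [if_neg (by omega : ¬ i > j), if_neg (by omega : ¬ i = j)]
  have hinit : (if pvClose (pvAt l i) = some (pvAt l j) then
        let r := gF l n ((j - i).toNat) (i+1) (j-1)
        (r.1, (r.1, pvAt l i :: r.2 ++ [pvAt l j]))
      else (n + 1, ((0:Int), ([]:List Char)))) = initG l n i j := by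
    unfold initG
    by_cases hm : pvClose (pvAt l i) = some (pvAt l j)
    · simp only [if_pos hm]
      rw [gF_eq_g l n (by omega)]
    · simp [hm]
  rw [hinit]
  refine congrArg Prod.snd (PySem.List.foldl_congr_mem' (PySem.List.pyRange i j 1)
    (fun st k =>
      let r1 := gF l n ((j - i).toNat) i k
      let r2 := gF l n ((j - i).toNat) (k+1) j
      if st.1 > r1.1 + r2.1 then (r1.1 + r2.1, (r1.1 + r2.1, r1.2 ++ r2.2)) else st)
    (stepG l n i j) (initG l n i j) ?_)
  intro k hk st
  rw [PySem.List.mem_pyRange_one] at hk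
  unfold stepG
  simp only [gF_eq_g l n (show (k - i).toNat < (j - i).toNat by omega),
    gF_eq_g l n (show (j - (k+1)).toNat < (j - i).toNat by omega)]

-- cost bound: the first component of g is between 0 and max (j-i+1) 0
theorem g_fst_bounds (l : List Char) (n : Int) (i j : Int) :
    0 ≤ (g l n i j).1 ∧ (g l n i j).1 ≤ max (j - i + 1) 0 := by
  have main : ∀ gap : Nat, ∀ i j : Int, (j - i).toNat ≤ gap →
      0 ≤ (g l n i j).1 ∧ (g l n i j).1 ≤ max (j - i + 1) 0 := by
    intro gap
    induction gap with
    | zero =>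
      intro i j hle
      rcases lt_trichotomy i j with h | h | h
      · omega
      · subst h; rw [g_eq]; rcases max_cases (i - i + 1) (0:Int) with ⟨h1, _⟩ | ⟨h1, h2⟩ <;> omega
      · rw [g_gt l n h]; simp
    | succ gap ih =>
      intro i j hle
      rcases lt_trichotomy i j with h | h | h
      · rw [g_lt l n h]
        have hP := List.foldlRecOn (motive := fun st => 0 ≤ st.2.1 ∧ st.2.1 ≤ max (j - i + 1) 0)
          (PySem.List.pyRange i j 1) (stepG l n i j) (b := initG l n i j)
          (by
            unfold initG
            by_cases hm : pvClose (pvAt l i) = some (pvAt l j)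
            · simp only [if_pos hm]
              have := ih (i+1) (j-1) (by omega)
              rcases max_cases (j - 1 - (i + 1) + 1) (0:Int) with ⟨h1, _⟩ | ⟨h1, _⟩ <;>
                rcases max_cases (j - i + 1) (0:Int) with ⟨h2, _⟩ | ⟨h2, _⟩ <;> omega
            · simp only [if_neg hm]
              constructor
              · norm_num
              · rcases max_cases (j - i + 1) (0:Int) with ⟨h2, _⟩ | ⟨h2, _⟩ <;> omega)
          (by
            intro st hst k hk
            rw [PySem.List.mem_pyRange_one] at hk
            unfold stepG
            by_cases hc : st.1 > (g l n i k).1 + (g l n (k+1) j).1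
            · simp only [if_pos hc]
              have h1 := ih i k (by omega)
              have h2 := ih (k+1) j (by omega)
              rcases max_cases (k - i + 1) (0:Int) with ⟨ha, _⟩ | ⟨ha, _⟩ <;>
                rcases max_cases (j - (k+1) + 1) (0:Int) with ⟨hb, _⟩ | ⟨hb, _⟩ <;>
                rcases max_cases (j - i + 1) (0:Int) with ⟨hc2, _⟩ | ⟨hc2, _⟩ <;>
                refine ⟨?_, ?_⟩ <;> dsimp only <;> omega
            · simp only [if_neg hc]; exact hst)
        exact hP
      · subst h; rw [g_eq]; rcases max_cases (i - i + 1) (0:Int) with ⟨h1, _⟩ | ⟨h1, h2⟩ <;> omega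
      · rw [g_gt l n h]; simp
  exact main (j - i).toNat i j le_rfl

-- ===== A-side correctness =====
def InvA (l : List Char) (n : Int) (dp : PySem.Dict (Int × Int) (Int × List Char)) : Prop :=
  ∀ p v, dp.get? p = some v → v = g l n p.1 p.2

theorem searchA_succ (l : List Char) (n : Int) (fuel : Nat)
    (dp : PySem.Dict (Int × Int) (Int × List Char)) (i j : Int) :
    searchA l n (fuel+1) dp i j =
    (match dp.get? (i, j) with
    | some r => (r, dp)
    | none =>
      if i > j then ((0, []), dp)
      else if i = j then
        ((1, []), dp.insert (i, j) ((1 : Int), ([] : List Char)))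
      else
        let init : Int × (Int × List Char) × PySem.Dict (Int × Int) (Int × List Char) :=
          if pvClose (pvAt l i) = some (pvAt l j) then
            let r := searchA l n fuel dp (i+1) (j-1)
            (r.1.1, (r.1.1, pvAt l i :: r.1.2 ++ [pvAt l j]), r.2)
          else (n + 1, ((0 : Int), ([] : List Char)), dp)
        let st := (PySem.List.pyRange i j 1).foldl (fun st k =>
          let r1 := searchA l n fuel st.2.2 i k
          let r2 := searchA l n fuel r1.2 (k+1) j
          if st.1 > r1.1.1 + r2.1.1 then
            (r1.1.1 + r2.1.1, (r1.1.1 + r2.1.1, r1.1.2 ++ r2.1.2), r2.2)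
          else (st.1, st.2.1, r2.2)) init
        (st.2.1, st.2.2.insert (i, j) st.2.1)) := rfl

theorem searchA_correct (l : List Char) (n : Int) :
    ∀ fuel dp i j, InvA l n dp → (j - i).toNat < fuel →
      (searchA l n fuel dp i j).1 = g l n i j ∧ InvA l n (searchA l n fuel dp i j).2 := by
  intro fuel
  induction fuel with
  | zero => intro dp i j _ h; omega
  | succ fuel ih =>
    intro dp i j hInv hfuel
    rw [searchA_succ]
    cases hdp : dp.get? (i, j) with
    | some r =>
      exact ⟨hInv (i, j) r hdp, hInv⟩
    | none =>
      by_cases hgt : i > j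
      · simp only [if_pos hgt]
        exact ⟨(g_gt l n hgt).symm, hInv⟩
      · simp only [if_neg hgt]
        by_cases heq : i = j
        · subst heq
          rw [if_pos rfl]
          refine ⟨(g_eq l n i).symm, ?_⟩
          intro p v hp
          rw [PySem.Dict.get?_insert] at hp
          split_ifs at hp with hpe
          · cases hp; subst hpe; exact (g_eq l n i).symm
          · exact hInv p v hp
        · simp only [if_neg heq]
          have hij : i < j := by omega
          -- the loop, relative to the pure fold
          have loop : ∀ ks : List Int, (∀ k ∈ ks, i ≤ k ∧ k < j) →
              ∀ dp0 m r, InvA l n dp0 →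
              (ks.foldl (fun st k =>
                let r1 := searchA l n fuel st.2.2 i k
                let r2 := searchA l n fuel r1.2 (k+1) j
                if st.1 > r1.1.1 + r2.1.1 then
                  (r1.1.1 + r2.1.1, (r1.1.1 + r2.1.1, r1.1.2 ++ r2.1.2), r2.2)
                else (st.1, st.2.1, r2.2)) (m, r, dp0)).1
                = (ks.foldl (stepG l n i j) (m, r)).1 ∧
              (ks.foldl (fun st k =>
                let r1 := searchA l n fuel st.2.2 i k
                let r2 := searchA l n fuel r1.2 (k+1) j
                if st.1 > r1.1.1 + r2.1.1 then
                  (r1.1.1 + r2.1.1, (r1.1.1 + r2.1.1, r1.1.2 ++ r2.1.2), r2.2)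
                else (st.1, st.2.1, r2.2)) (m, r, dp0)).2.1
                = (ks.foldl (stepG l n i j) (m, r)).2 ∧
              InvA l n (ks.foldl (fun st k =>
                let r1 := searchA l n fuel st.2.2 i k
                let r2 := searchA l n fuel r1.2 (k+1) j
                if st.1 > r1.1.1 + r2.1.1 then
                  (r1.1.1 + r2.1.1, (r1.1.1 + r2.1.1, r1.1.2 ++ r2.1.2), r2.2)
                else (st.1, st.2.1, r2.2)) (m, r, dp0)).2.2 := by
            intro ks
            induction ks with
            | nil => intro _ dp0 m r h0; exact ⟨rfl, rfl, h0⟩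
            | cons k ks ihk =>
              intro hks dp0 m r h0
              obtain ⟨hk1, hk2⟩ := hks k (List.mem_cons_self)
              have hrest : ∀ k' ∈ ks, i ≤ k' ∧ k' < j :=
                fun k' hk' => hks k' (List.mem_cons_of_mem _ hk')
              obtain ⟨h1a, h1b⟩ := ih dp0 i k h0 (by omega)
              obtain ⟨h2a, h2b⟩ := ih (searchA l n fuel dp0 i k).2 (k+1) j h1b (by omega)
              simp only [List.foldl_cons]
              simp only [h1a, h2a]
              unfold stepG
              by_cases hc : m > (g l n i k).1 + (g l n (k+1) j).1
              · simp only [if_pos hc]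
                exact ihk hrest _ _ _ h2b
              · simp only [if_neg hc]
                exact ihk hrest _ _ _ h2b
          by_cases hm : pvClose (pvAt l i) = some (pvAt l j)
          · simp only [if_pos hm]
            obtain ⟨hia, hib⟩ := ih dp (i+1) (j-1) hInv (by omega)
            simp only [hia]
            obtain ⟨hl1, hl2, hl3⟩ := loop (PySem.List.pyRange i j 1)
              (fun k hk => by rw [PySem.List.mem_pyRange_one] at hk; exact hk)
              (searchA l n fuel dp (i+1) (j-1)).2
              ((g l n (i+1) (j-1)).1)
              ((g l n (i+1) (j-1)).1,
                pvAt l i :: (g l n (i+1) (j-1)).2 ++ [pvAt l j]) hib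
            have hpure : ((PySem.List.pyRange i j 1).foldl (stepG l n i j)
                ((g l n (i+1) (j-1)).1, ((g l n (i+1) (j-1)).1,
                  pvAt l i :: (g l n (i+1) (j-1)).2 ++ [pvAt l j]))).2 = g l n i j := by
              rw [g_lt l n hij]
              congr 1
              unfold initG
              rw [if_pos hm]
            constructor
            · rw [hl2, hpure]
            · intro p v hp
              rw [PySem.Dict.get?_insert] at hp
              split_ifs at hp with hpe
              · cases hp; subst hpe
                rw [hl2, hpure]
              · exact hl3 p v hp
          · simp only [if_neg hm]
            obtain ⟨hl1, hl2, hl3⟩ := loop (PySem.List.pyRange i j 1)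
              (fun k hk => by rw [PySem.List.mem_pyRange_one] at hk; exact hk)
              dp (n+1) ((0 : Int), ([] : List Char)) hInv
            have hpure : ((PySem.List.pyRange i j 1).foldl (stepG l n i j)
                ((n+1 : Int), ((0 : Int), ([] : List Char)))).2 = g l n i j := by
              rw [g_lt l n hij]
              congr 1
              unfold initG
              rw [if_neg hm]
            constructor
            · rw [hl2, hpure]
            · intro p v hp
              rw [PySem.Dict.get?_insert] at hp
              split_ifs at hp with hpe
              · cases hp; subst hpe
                rw [hl2, hpure]
              · exact hl3 p v hp

-- ===== B-side correctness =====
def CorrB (l : List Char) (n : Int) (t : PySem.Dict (Int × Int) (Int × List Char)) : Prop :=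
  ∀ p v, t.get? p = some v → p.1 ≤ p.2 ∧ v = g l n p.1 p.2

def ComplB (n : Int) (L : Int) (t : PySem.Dict (Int × Int) (Int × List Char)) : Prop :=
  ∀ a b : Int, 0 ≤ a → a ≤ b → b < n → b - a + 1 ≤ L → t.contains (a, b) = true

-- proof-side views of solve_alt's loops
def stepB (l : List Char) (n : Int) (t : PySem.Dict (Int × Int) (Int × List Char)) (i j : Int) :
    Int × List Char :=
  let best :=
    if pvClose (pvAt l i) = some (pvAt l j) then
      let ds := t.getD (i+1, j-1) (0, [])
      (ds.1, pvAt l i :: ds.2 ++ [pvAt l j])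
    else (n + 1, ([] : List Char))
  (PySem.List.pyRange i j 1).foldl (fun best k =>
    let p1 := t.getD (i, k) (0, [])
    let p2 := t.getD (k+1, j) (0, [])
    if p1.1 + p2.1 < best.1 then (p1.1 + p2.1, p1.2 ++ p2.2) else best) best

def innerB (l : List Char) (n : Int) (t : PySem.Dict (Int × Int) (Int × List Char)) (len : Int) :
    PySem.Dict (Int × Int) (Int × List Char) :=
  (PySem.List.pyRange 0 (n - len + 1) 1).foldl
    (fun t i => t.insert (i, i + len - 1) (stepB l n t i (i + len - 1))) t

def diagB (n : Int) : PySem.Dict (Int × Int) (Int × List Char) :=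
  (PySem.List.pyRange 0 n 1).foldl
    (fun t i => t.insert (i, i) ((1 : Int), ([] : List Char))) PySem.Dict.empty

theorem solve_alt_view (line : String) :
    solve_alt line =
      (if (line.toList.length : Int) = 0 then "" else
        String.ofList (((PySem.List.pyRange 2 ((line.toList.length : Int) + 1) 1).foldl
          (innerB line.toList (line.toList.length : Int))
          (diagB (line.toList.length : Int))).getD (0, (line.toList.length : Int) - 1) (0, [])).2) := rfl

-- a contains key implies some value equal to g
theorem getD_g (l : List Char) (n : Int) (L : Int)
    (t : PySem.Dict (Int × Int) (Int × List Char))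
    (hC : CorrB l n t) (hK : ComplB n L t) {a b : Int}
    (ha : 0 ≤ a) (hb : b < n) (hL : b - a + 1 ≤ L) :
    t.getD (a, b) (0, []) = g l n a b := by
  by_cases hab : a ≤ b
  · have hcont : t.contains (a, b) = true := hK a b ha hab hb hL
    cases hg : t.get? (a, b) with
    | none =>
      rw [PySem.Dict.contains_eq_isSome_get?, hg] at hcont
      simp at hcont
    | some v =>
      rw [PySem.Dict.getD_of_get?_eq_some t (0, []) hg]
      exact (hC (a, b) v hg).2
  · have hnone : t.get? (a, b) = none := by
      cases hg : t.get? (a, b) with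
      | none => rfl
      | some v => exact absurd (hC (a, b) v hg).1 hab
    rw [PySem.Dict.getD_eq_get?_getD, hnone, g_gt l n (by omega)]
    rfl

-- the matched/unmatched relation between B's best pair and the pure state
theorem relFold (l : List Char) (n : Int) (i j : Int) :
    ∀ ks : List Int, ∀ st : Int × (Int × List Char), ∀ b : Int × List Char,
      b = (st.1, st.2.2) → st.2.1 = st.1 →
      (ks.foldl (fun best k =>
          let p1 := g l n i k
          let p2 := g l n (k+1) j
          if p1.1 + p2.1 < best.1 then (p1.1 + p2.1, p1.2 ++ p2.2) else best) b)
        = ((ks.foldl (stepG l n i j) st).1, (ks.foldl (stepG l n i j) st).2.2) ∧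
      (ks.foldl (stepG l n i j) st).2.1 = (ks.foldl (stepG l n i j) st).1 := by
  intro ks
  induction ks with
  | nil => intro st b hb hst; exact ⟨hb, hst⟩
  | cons k ks ihk =>
    intro st b hb hst
    simp only [List.foldl_cons]
    unfold stepG
    by_cases hc : st.1 > (g l n i k).1 + (g l n (k+1) j).1
    · rw [if_pos hc, if_pos (by rw [hb]; exact hc)]
      exact ihk _ _ rfl rfl
    · rw [if_neg hc, if_neg (by rw [hb]; exact hc)]
      exact ihk _ _ hb hst

-- one window: B's inline computation equals g
theorem stepB_g (l : List Char) (n : Int) (L : Int)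
    (t : PySem.Dict (Int × Int) (Int × List Char))
    (hC : CorrB l n t) (hK : ComplB n L t) {i j : Int}
    (hi : 0 ≤ i) (hij : i < j) (hj : j < n) (hL : j - i ≤ L) :
    stepB l n t i j = g l n i j := by
  unfold stepB
  -- replace the table lookups inside the fold by g (t is fixed)
  rw [PySem.List.foldl_congr_mem' (PySem.List.pyRange i j 1) _
    (fun best k =>
      let p1 := g l n i k
      let p2 := g l n (k+1) j
      if p1.1 + p2.1 < best.1 then (p1.1 + p2.1, p1.2 ++ p2.2) else best) _
    (by
      intro k hk best
      rw [PySem.List.mem_pyRange_one] at hk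
      simp only [getD_g l n L t hC hK (by omega) (by omega) (by omega : k - i + 1 ≤ L),
        getD_g l n L t hC hK (by omega) (by omega) (by omega : j - (k+1) + 1 ≤ L)])]
  rw [g_lt l n hij]
  by_cases hm : pvClose (pvAt l i) = some (pvAt l j)
  · rw [if_pos hm, getD_g l n L t hC hK (by omega) (by omega) (by omega : j - 1 - (i+1) + 1 ≤ L)]
    have hrel := relFold l n i j (PySem.List.pyRange i j 1)
      (initG l n i j) ((g l n (i+1) (j-1)).1, pvAt l i :: (g l n (i+1) (j-1)).2 ++ [pvAt l j])
      (by unfold initG; rw [if_pos hm]) (by unfold initG; rw [if_pos hm])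
    rw [hrel.1, ← hrel.2]
  · rw [if_neg hm]
    have hinitG : initG l n i j = (n + 1, ((0:Int), ([] : List Char))) := by
      unfold initG; rw [if_neg hm]
    rw [hinitG, PySem.List.pyRange_one_cons hij]
    simp only [List.foldl_cons]
    have hb2 := g_fst_bounds l n (i+1) j
    have hcond : (g l n i i).1 + (g l n (i+1) j).1 < n + 1 := by
      rw [g_eq]
      rcases max_cases (j - (i+1) + 1) (0:Int) with ⟨h1, _⟩ | ⟨h1, _⟩ <;> dsimp only <;> omega
    have hstep : stepG l n i j ((n+1 : Int), ((0:Int), ([] : List Char))) i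
        = ((g l n i i).1 + (g l n (i+1) j).1,
           ((g l n i i).1 + (g l n (i+1) j).1, (g l n i i).2 ++ (g l n (i+1) j).2)) := by
      unfold stepG
      rw [if_pos hcond]
    rw [hstep, if_pos hcond]
    have hfin := relFold l n i j (PySem.List.pyRange (i+1) j 1)
      ((g l n i i).1 + (g l n (i+1) j).1,
        ((g l n i i).1 + (g l n (i+1) j).1, (g l n i i).2 ++ (g l n (i+1) j).2))
      ((g l n i i).1 + (g l n (i+1) j).1, (g l n i i).2 ++ (g l n (i+1) j).2) rfl rfl
    rw [hfin.1, ← hfin.2]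

-- the diagonal initialisation is correct and complete for size-1 windows
theorem diagB_spec (l : List Char) (n : Int) :
    CorrB l n (diagB n) ∧ ComplB n 1 (diagB n) := by
  have main : ∀ ks : List Int,
      ∀ t, CorrB l n t →
      CorrB l n (ks.foldl (fun t i => t.insert (i, i) ((1 : Int), ([] : List Char))) t) ∧
      (∀ p, t.contains p = true →
        (ks.foldl (fun t i => t.insert (i, i) ((1 : Int), ([] : List Char))) t).contains p = true) ∧
      (∀ a ∈ ks, (ks.foldl (fun t i => t.insert (i, i) ((1 : Int), ([] : List Char))) t).contains (a, a) = true) := by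
    intro ks
    induction ks with
    | nil => intro t hC; exact ⟨hC, fun p h => h, by simp⟩
    | cons x ks ihk =>
      intro t hC
      simp only [List.foldl_cons]
      have hC1 : CorrB l n (t.insert (x, x) ((1 : Int), ([] : List Char))) := by
        intro p v hp
        rw [PySem.Dict.get?_insert] at hp
        split_ifs at hp with hpe
        · cases hp; subst hpe; exact ⟨le_refl _, (g_eq l n x).symm⟩
        · exact hC p v hp
      obtain ⟨h1, h2, h3⟩ := ihk _ hC1
      refine ⟨h1, ?_, ?_⟩
      · intro p hp
        exact h2 p (by rw [PySem.Dict.contains_insert, hp, Bool.or_true])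
      · intro a ha
        rcases List.mem_cons.mp ha with rfl | ha
        · exact h2 (a, a) (PySem.Dict.contains_insert_self t _ _)
        · exact h3 a ha
  obtain ⟨h1, _, h3⟩ := main (PySem.List.pyRange 0 n 1) PySem.Dict.empty
    (by intro p v hp; rw [PySem.Dict.get?_empty] at hp; cases hp)
  refine ⟨h1, ?_⟩
  intro a b ha hab hb hsz
  have hba : b = a := by omega
  rw [hba]
  exact h3 a (by rw [PySem.List.mem_pyRange_one]; omega)

-- one full length pass upgrades completeness from len-1 to len
theorem innerB_spec (l : List Char) (n : Int) (len : Int) (h2 : 2 ≤ len) :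
    ∀ t, CorrB l n t → ComplB n (len - 1) t →
      CorrB l n (innerB l n t len) ∧ ComplB n len (innerB l n t len) := by
  have main : ∀ is : List Int, (∀ a ∈ is, 0 ≤ a ∧ a + len - 1 < n) →
      ∀ t, CorrB l n t → ComplB n (len - 1) t →
      CorrB l n (is.foldl (fun t i => t.insert (i, i + len - 1) (stepB l n t i (i + len - 1))) t) ∧
      ComplB n (len - 1) (is.foldl (fun t i => t.insert (i, i + len - 1) (stepB l n t i (i + len - 1))) t) ∧
      (∀ a ∈ is, (is.foldl (fun t i => t.insert (i, i + len - 1) (stepB l n t i (i + len - 1))) t).contains (a, a + len - 1) = true) := by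
    intro is
    induction is with
    | nil => intro _ t hC hK; exact ⟨hC, hK, by simp⟩
    | cons x is ihk =>
      intro hmem t hC hK
      obtain ⟨hx0, hxn⟩ := hmem x List.mem_cons_self
      simp only [List.foldl_cons]
      have hval : stepB l n t x (x + len - 1) = g l n x (x + len - 1) :=
        stepB_g l n (len - 1) t hC hK hx0 (by omega) hxn (by omega)
      have hC1 : CorrB l n (t.insert (x, x + len - 1) (stepB l n t x (x + len - 1))) := by
        intro p v hp
        rw [PySem.Dict.get?_insert] at hp
        split_ifs at hp with hpe
        · cases hp; subst hpe; exact ⟨by omega, hval⟩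
        · exact hC p v hp
      have hK1 : ComplB n (len - 1) (t.insert (x, x + len - 1) (stepB l n t x (x + len - 1))) := by
        intro a b ha hab hb hsz
        rw [PySem.Dict.contains_insert, hK a b ha hab hb hsz, Bool.or_true]
      obtain ⟨h1, h2, h3⟩ := ihk (fun a ha => hmem a (List.mem_cons_of_mem _ ha)) _ hC1 hK1
      refine ⟨h1, h2, ?_⟩
      · intro a ha
        rcases List.mem_cons.mp ha with rfl | ha
        · -- preserved membership of the freshly inserted key through the rest of the fold
          have : ∀ is2 : List Int, ∀ t2 : PySem.Dict (Int × Int) (Int × List Char),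
              ∀ p, t2.contains p = true →
              (is2.foldl (fun t i => t.insert (i, i + len - 1) (stepB l n t i (i + len - 1))) t2).contains p = true := by
            intro is2
            induction is2 with
            | nil => intro t2 p h; exact h
            | cons y ys ihy =>
              intro t2 p h
              simp only [List.foldl_cons]
              exact ihy _ p (by rw [PySem.Dict.contains_insert, h, Bool.or_true])
          exact this is _ _ (PySem.Dict.contains_insert_self t _ _)
        · exact h3 a ha
  intro t hC hK
  obtain ⟨h1, h2, h3⟩ := main (PySem.List.pyRange 0 (n - len + 1) 1)
    (by intro a ha; rw [PySem.List.mem_pyRange_one] at ha; omega) t hC hK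
  refine ⟨h1, ?_⟩
  intro a b ha hab hb hsz
  by_cases hlast : b - a + 1 ≤ len - 1
  · exact h2 a b ha hab hb hlast
  · have hba : b = a + len - 1 := by omega
    subst hba
    exact h3 a (by rw [PySem.List.mem_pyRange_one]; omega)

-- the whole bottom-up build
theorem buildB_spec (l : List Char) (n : Int) :
    ∀ m : Nat,
      CorrB l n ((PySem.List.pyRange 2 (2 + (m : Int)) 1).foldl (innerB l n) (diagB n)) ∧
      ComplB n ((m : Int) + 1) ((PySem.List.pyRange 2 (2 + (m : Int)) 1).foldl (innerB l n) (diagB n)) := by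
  intro m
  induction m with
  | zero =>
    rw [PySem.List.pyRange_one_eq_nil (by omega)]
    exact diagB_spec l n
  | succ m ihm =>
    have hsplit : PySem.List.pyRange 2 (2 + ((m : Int) + 1)) 1
        = PySem.List.pyRange 2 (2 + (m : Int)) 1 ++ [2 + (m : Int)] := by
      rw [show (2 + ((m : Int) + 1)) = (2 + (m : Int)) + 1 by ring]
      exact PySem.List.pyRange_one_succ_right (by omega)
    push_cast
    push_cast at ihm
    rw [hsplit, List.foldl_append]
    simp only [List.foldl_cons, List.foldl_nil]
    obtain ⟨hC, hK⟩ := ihm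
    have := innerB_spec l n (2 + (m : Int)) (by omega)
      ((PySem.List.pyRange 2 (2 + (m : Int)) 1).foldl (innerB l n) (diagB n)) hC
      (by rw [show (2 + (m : Int) - 1) = (m : Int) + 1 by ring]; exact hK)
    refine ⟨this.1, ?_⟩
    intro a b ha hab hb hsz
    exact this.2 a b ha hab hb (by omega)

theorem solve_alt_eq (line : String) :
    solve_alt line = String.ofList (g line.toList (line.toList.length : Int) 0 ((line.toList.length : Int) - 1)).2 := by
  rw [solve_alt_view]
  by_cases h0 : (line.toList.length : Int) = 0
  · rw [if_pos h0]
    rw [g_gt line.toList (line.toList.length : Int) (by omega)]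
  · rw [if_neg h0]
    have hn1 : 1 ≤ (line.toList.length : Int) := by
      have : 0 ≤ (line.toList.length : Int) := by positivity
      omega
    obtain ⟨hC, hK⟩ := buildB_spec line.toList (line.toList.length : Int) ((line.toList.length : Int) - 1).toNat
    have hcast : 2 + ((((line.toList.length : Int) - 1).toNat : Int)) = (line.toList.length : Int) + 1 := by omega
    rw [hcast] at hC hK
    rw [getD_g line.toList (line.toList.length : Int) ((((line.toList.length : Int) - 1).toNat : Int) + 1)
      _ hC hK (by omega) (by omega) (by omega)]

theorem solve_eq (line : String) :
    solve line = String.ofList (g line.toList (line.toList.length : Int) 0 ((line.toList.length : Int) - 1)).2 := by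
  have h := (searchA_correct line.toList (line.toList.length : Int) (line.toList.length + 1)
    PySem.Dict.empty 0 ((line.toList.length : Int) - 1)
    (fun p v hp => by rw [PySem.Dict.get?_empty] at hp; cases hp) (by omega)).1
  show String.ofList (searchA line.toList (line.toList.length : Int) (line.toList.length + 1)
    PySem.Dict.empty 0 ((line.toList.length : Int) - 1)).1.2 = _
  rw [h]

-- ===== VERDICT (by name: the statement is the Claim_ definition above) =====
theorem solve_spec : Claim_equal_solve := by
  intro line _
  unfold Spec_solve
  rw [solve_eq, solve_alt_eq]
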